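-- pv_equiv track=rewrite | github.com/poemm/bigint_experiments | bigint.py | REDC_multiprecision
-- ===== SOURCE A (Python) =====
-- def REDC_multiprecision(T,N,Nprime,n):
--   # T is the bigint value to be reduced
--   # N is the bigint modulus
--   # Nprime is the 64-bit montgomery parameter
--   # n is the number of limbs of the modulus
--
--   b = 2**64   # the base
--
--   # convert inputs to limbs in base b, starting with least-significant limb
--   T_=[0]*(2*n+1)  # with extra limb for carries
--   for i in range(2*n):  T_[i] = T%b;  T = T//b
--   N_=[0]*n
--   for i in range(n):    N_[i] = N%b;  N = N//b
--
--   # main loop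
--   c = 0
--   for i in range(n):
--     # from [M85]: (d T_{i+n-1} ... T_i)_b <- (0 T_{i+n-1} ... T_i)_b + N*(T_i*N' mod R)
--     TixNprime = (T_[i]*Nprime) % b
--     d = 0
--     for j in range(n):
--       temp = T_[i+j] + N_[j]*TixNprime + d
--       T_[i+j] = temp % b
--       d = temp // b
--     # from [M85]: (c T_{i+n})_b <- c + d + T_{i+n}
--     temp = c + d + T_[i+n]
--     T_[i+n] = temp % b
--     c = temp // b
--   T_[2*n] += c
--
--   # convert result T_ back to bigint, ignoring lowest n limbs
--   for i in range(n+1): T += T_[n+i] * b**i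
--
--   # finally, subtract the modulus if we exceed it
--   if T>=N:
--     return T-N
--   else:
--     return T
-- ===== SOURCE B (Python) =====
-- def REDC_multiprecision(T, N, Nprime, n):
--     # Montgomery reduction on a single running big integer: make the accumulator
--     # divisible by b**n one base-b digit at a time, then divide.
--     b = 2 ** 64
--     A = T
--     for i in range(n):
--         m = (A // b ** i) % b * Nprime % b
--         A += m * N * b ** i
--     return A // b ** n
-- ===== Notes on version B (the rewrite author's own statement) =====
-- stated objective: simpler
-- what changed: Replaces A's limb arrays with their nested interpreted carry loops by Montgomery steps on one running Python big integer (the current digit read off with // and %, the multiple of N added back in one big-int operation, final single division); Pre_ restricts to the natural domain of a multiprecision Montgomery reduction: A raises IndexError for n < 0, and n = 0 (no limbs), negative T, or a negative modulus N are malformed inputs on which A's floor-division limb loading returns accidental values.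
-- outside the precondition, e.g. on REDC_multiprecision(5, 3, 1, 0): A returns 2, B returns 5; on REDC_multiprecision(-1, 3, 1, 1): A returns 18446744073709551617, B returns 2; on REDC_multiprecision(0, -3, 1, 1): A returns 1, B returns 0
import Mathlib
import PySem

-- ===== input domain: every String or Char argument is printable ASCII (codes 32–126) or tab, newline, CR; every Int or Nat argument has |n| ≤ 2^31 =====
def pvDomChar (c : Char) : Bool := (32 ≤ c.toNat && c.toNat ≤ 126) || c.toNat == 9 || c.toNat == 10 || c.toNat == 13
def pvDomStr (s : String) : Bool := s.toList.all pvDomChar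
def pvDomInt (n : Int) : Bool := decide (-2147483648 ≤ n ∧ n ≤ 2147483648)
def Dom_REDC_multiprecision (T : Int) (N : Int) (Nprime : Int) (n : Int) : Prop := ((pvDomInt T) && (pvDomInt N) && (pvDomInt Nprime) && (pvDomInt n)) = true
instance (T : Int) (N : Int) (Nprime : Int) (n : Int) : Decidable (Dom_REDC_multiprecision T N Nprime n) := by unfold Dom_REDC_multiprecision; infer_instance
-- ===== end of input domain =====

-- B replaces A's limb arrays and hand-written carry loops by Montgomery steps on one
-- running big integer (objective: simpler).

-- ===== PORT A =====
def pvB : Int := 2 ^ 64   -- b = 2**64, the base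

-- 'for i in range(cnt): L[i] = x % b; x = x // b' starting from L = [0]*len
def pvLoad (x : Int) (len : Int) (cnt : Int) : List Int × Int :=
  (PySem.List.pyRange 0 cnt 1).foldl
    (fun s i => (PySem.List.pySetD s.1 i (PySem.Int.mod s.2 pvB), PySem.Int.floordiv s.2 pvB))
    (List.replicate len.toNat 0, x)

-- the inner 'for j in range(n)' loop: returns (updated T_, final carry d)
def pvInner (N_ : List Int) (TixNprime : Int) (n : Int) (T_ : List Int) (i : Int) :
    List Int × Int :=
  (PySem.List.pyRange 0 n 1).foldl
    (fun t j =>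
      let temp := PySem.List.pyGetD t.1 (i + j) 0 + PySem.List.pyGetD N_ j 0 * TixNprime + t.2
      (PySem.List.pySetD t.1 (i + j) (PySem.Int.mod temp pvB), PySem.Int.floordiv temp pvB))
    (T_, 0)

-- one iteration of the main 'for i in range(n)' loop on state (T_, c)
def pvOuterStep (N_ : List Int) (Nprime : Int) (n : Int) (s : List Int × Int) (i : Int) :
    List Int × Int :=
  let TixNprime := PySem.Int.mod (PySem.List.pyGetD s.1 i 0 * Nprime) pvB
  let r := pvInner N_ TixNprime n s.1 i
  let temp := s.2 + r.2 + PySem.List.pyGetD r.1 (i + n) 0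
  (PySem.List.pySetD r.1 (i + n) (PySem.Int.mod temp pvB), PySem.Int.floordiv temp pvB)

def REDC_multiprecision (T : Int) (N : Int) (Nprime : Int) (n : Int) : Int :=
  let loadT := pvLoad T (2*n+1) (2*n)        -- T_ with extra carry limb; T becomes T // b^(2n)
  let loadN := pvLoad N n n                  -- N_ ; N becomes N // b^n
  let main := (PySem.List.pyRange 0 n 1).foldl (pvOuterStep loadN.1 Nprime n) (loadT.1, 0)
  let T_ := PySem.List.pySetD main.1 (2*n) (PySem.List.pyGetD main.1 (2*n) 0 + main.2)
  let Tfin := (PySem.List.pyRange 0 (n+1) 1).foldl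
    (fun acc i => acc + PySem.List.pyGetD T_ (n + i) 0 * pvB ^ i.toNat) loadT.2
  if Tfin ≥ loadN.2 then Tfin - loadN.2 else Tfin

-- ===== PORT B =====
def REDC_multiprecision_alt (T : Int) (N : Int) (Nprime : Int) (n : Int) : Int :=
  let A := (PySem.List.pyRange 0 n 1).foldl
    (fun A i =>
      let m := PySem.Int.mod (PySem.Int.mod (PySem.Int.floordiv A (pvB ^ i.toNat)) pvB * Nprime) pvB
      A + m * N * pvB ^ i.toNat)
    T
  PySem.Int.floordiv A (pvB ^ n.toNat)

-- ===== PRECONDITION & SPEC =====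
-- Pre_ restricts to the natural domain of a multiprecision Montgomery reduction: A raises
-- IndexError for n < 0, and n = 0 (no limbs), a negative operand T or a negative modulus N
-- are malformed inputs on which A's floor-division limb loading returns accidental values.
def Pre_REDC_multiprecision (T : Int) (N : Int) (Nprime : Int) (n : Int) : Prop :=
  0 ≤ T ∧ 0 ≤ N ∧ 1 ≤ n
instance (T : Int) (N : Int) (Nprime : Int) (n : Int) : Decidable (Pre_REDC_multiprecision T N Nprime n) := by unfold Pre_REDC_multiprecision; infer_instance
def pvWitness_REDC_multiprecision : Int × Int × Int × Int := (7, 5, 3, 1)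

def Spec_REDC_multiprecision (T : Int) (N : Int) (Nprime : Int) (n : Int) (out : Int) : Prop := out = REDC_multiprecision_alt T N Nprime n
instance (T : Int) (N : Int) (Nprime : Int) (n : Int) (out : Int) : Decidable (Spec_REDC_multiprecision T N Nprime n out) := by unfold Spec_REDC_multiprecision; infer_instance

-- ===== CLAIM (what is proved, stated in full; the proofs are below) =====
def Claim_equal_REDC_multiprecision : Prop := ∀ (T : Int) (N : Int) (Nprime : Int) (n : Int), Dom_REDC_multiprecision T N Nprime n → Pre_REDC_multiprecision T N Nprime n → Spec_REDC_multiprecision T N Nprime n (REDC_multiprecision T N Nprime n)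

-- ===== LEMMAS AND PROOFS =====

theorem pvB_pos : (0 : Int) < pvB := by norm_num [pvB]

theorem pvPow_pos (k : Nat) : (0 : Int) < pvB ^ k := pow_pos pvB_pos k

theorem pvPow_le {j k : Nat} (h : j ≤ k) : pvB ^ j ≤ pvB ^ k :=
  pow_le_pow_right₀ (by norm_num [pvB]) h

-- the k-th base-b limb of a big integer
def pvDig (x : Int) (k : Nat) : Int := x / pvB ^ k % pvB

-- the first p limbs of x, least significant first
def pvLimbs (x : Int) (p : Nat) : List Int := (List.range p).map (fun k => pvDig x k)

theorem pv_ediv_pow_pow (x : Int) (j k : Nat) : x / pvB ^ j / pvB ^ k = x / pvB ^ (j + k) := by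
  rw [Int.ediv_ediv_of_nonneg (le_of_lt (pvPow_pos j)), pow_add]

theorem pvDig_ediv (x : Int) (j k : Nat) : pvDig (x / pvB ^ j) k = pvDig x (j + k) := by
  unfold pvDig; rw [pv_ediv_pow_pow]

theorem pvDig_eq_emod (x : Int) (k : Nat) : pvDig x k = x % pvB ^ (k + 1) / pvB ^ k := by
  have h1 : x % pvB ^ (k + 1) = x + (-(pvB * (x / pvB ^ (k + 1)))) * pvB ^ k := by
    rw [Int.emod_def]; ring
  have h2 : x % pvB ^ (k + 1) / pvB ^ k = x / pvB ^ k + (-(pvB * (x / pvB ^ (k + 1)))) := by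
    rw [h1, Int.add_mul_ediv_right _ _ (ne_of_gt (pvPow_pos k))]
  have h3 : x / pvB ^ (k + 1) = x / pvB ^ k / pvB := by
    rw [← pv_ediv_pow_pow x k 1, pow_one]
  rw [pvDig, h2, h3, Int.emod_def]; ring

theorem pvDig_congr {x y : Int} (k : Nat) (h : x % pvB ^ (k + 1) = y % pvB ^ (k + 1)) :
    pvDig x k = pvDig y k := by rw [pvDig_eq_emod, pvDig_eq_emod, h]

theorem pv_emod_pow_emod (x : Int) {j k : Nat} (h : j ≤ k) :
    x % pvB ^ k % pvB ^ j = x % pvB ^ j :=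
  Int.emod_emod_of_dvd x (pow_dvd_pow pvB h)

theorem pvDig_emod (x : Int) {k q : Nat} (h : k < q) : pvDig (x % pvB ^ q) k = pvDig x k :=
  pvDig_congr k (pv_emod_pow_emod x h)

theorem pvDig_add_mul_low (x w : Int) {k q : Nat} (h : k < q) :
    pvDig (x + w * pvB ^ q) k = pvDig x k := by
  refine pvDig_congr k ?_
  have h1 : pvB ^ q = pvB ^ (k + 1) * pvB ^ (q - (k + 1)) := by rw [← pow_add]; congr 1; omega
  have h2 : x + w * pvB ^ q = x + pvB ^ (k + 1) * (w * pvB ^ (q - (k + 1))) := by rw [h1]; ring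
  rw [h2, Int.add_mul_emod_self_left]

theorem pvDig_add_mul_high (u w : Int) {q k : Nat} (hu : 0 ≤ u) (hult : u < pvB ^ q)
    (h : q ≤ k) : pvDig (u + w * pvB ^ q) k = pvDig w (k - q) := by
  have hdiv : (u + w * pvB ^ q) / pvB ^ q = w := by
    rw [Int.add_mul_ediv_right _ _ (ne_of_gt (pvPow_pos q)),
      Int.ediv_eq_zero_of_lt hu hult, zero_add]
  have : pvDig (u + w * pvB ^ q) k = pvDig ((u + w * pvB ^ q) / pvB ^ q) (k - q) := by
    rw [pvDig_ediv]; congr 1; omega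
  rw [this, hdiv]

theorem pvDig_zero_of_lt {x : Int} {q k : Nat} (hx : 0 ≤ x) (hlt : x < pvB ^ q) (h : q ≤ k) :
    pvDig x k = 0 := by
  unfold pvDig
  rw [Int.ediv_eq_zero_of_lt hx (lt_of_lt_of_le hlt (pvPow_le h))]
  simp

theorem pv_emod_succ (x : Int) (k : Nat) :
    x % pvB ^ (k + 1) = x % pvB ^ k + pvB ^ k * pvDig x k := by
  have h1 : x % pvB ^ (k + 1) % pvB ^ k = x % pvB ^ k := pv_emod_pow_emod x (by omega)
  have h2 := Int.emod_add_ediv (x % pvB ^ (k + 1)) (pvB ^ k)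
  rw [h1, ← pvDig_eq_emod] at h2
  omega

theorem pvLimbs_getD {q p : Nat} (h : q < p) (x : Int) :
    (pvLimbs x p).getD q 0 = pvDig x q := by
  rw [List.getD_eq_getElem?_getD]
  simp [pvLimbs, h]

theorem pvLimbs_set {q p : Nat} (h : q < p) (x V v : Int) (hv : v = pvDig V q)
    (hk : ∀ k, k < p → k ≠ q → pvDig x k = pvDig V k) :
    (pvLimbs x p).set q v = pvLimbs V p := by
  apply List.ext_getElem
  · simp [pvLimbs]
  · intro k hk1 hk2
    have hkp : k < p := by simpa [pvLimbs] using hk2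
    simp only [List.getElem_set, pvLimbs, List.getElem_map, List.getElem_range]
    by_cases hqk : q = k
    · simp [hqk, hv]
    · simp only [if_neg hqk]
      exact hk k hkp (fun hh => hqk hh.symm)

theorem pvLimbs_zero (p : Nat) : pvLimbs 0 p = List.replicate p 0 := by
  have : ∀ k : Nat, pvDig 0 k = 0 := by intro k; simp [pvDig]
  simp only [pvLimbs, this]
  rw [List.map_const', List.length_range]

-- peel the last element off a 'for i in range(m)' fold
theorem pv_foldl_pyRange_succ {α : Type} (f : α → Int → α) (s : α) (i : Nat) :
    (PySem.List.pyRange 0 (↑i + 1) 1).foldl f s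
      = f ((PySem.List.pyRange 0 ↑i 1).foldl f s) ↑i := by
  rw [PySem.List.pyRange_one_succ_right (by positivity), List.foldl_append]
  rfl

theorem pv_pyRange_zero_nil : PySem.List.pyRange 0 0 1 = [] :=
  PySem.List.pyRange_one_eq_nil (le_refl 0)

-- characterization of the limb-loading loops of A
theorem pvLoad_spec (x : Int) (p cnt : Nat) (h : cnt ≤ p) :
    pvLoad x ↑p ↑cnt = (pvLimbs (x % pvB ^ cnt) p, x / pvB ^ cnt) := by
  induction cnt with
  | zero =>
    simp only [pvLoad, Nat.cast_zero, pv_pyRange_zero_nil, List.foldl_nil]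
    rw [pow_zero, Int.emod_one, Int.ediv_one, pvLimbs_zero]
    simp
  | succ c ih =>
    have hc : c ≤ p := by omega
    unfold pvLoad
    rw [show ((c + 1 : Nat) : Int) = ↑c + 1 by push_cast; ring, pv_foldl_pyRange_succ]
    have := ih hc
    unfold pvLoad at this
    rw [this]
    simp only [Prod.mk.injEq]
    refine ⟨?_, ?_⟩
    · rw [PySem.List.pySetD_natCast, PySem.Int.mod_eq_emod_of_pos pvB_pos]
      apply pvLimbs_set (show c < p by omega)
      · rw [pvDig_emod x (Nat.lt_succ_self c)]; rfl
      · intro k hk1 hk2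
        by_cases hkc : k < c
        · rw [pvDig_emod x hkc, pvDig_emod x (by omega)]
        · have hck : c + 1 ≤ k := by omega
          rw [pvDig_zero_of_lt (Int.emod_nonneg _ (ne_of_gt (pvPow_pos c)))
              (Int.emod_lt_of_pos _ (pvPow_pos c)) (by omega),
            pvDig_zero_of_lt (Int.emod_nonneg _ (ne_of_gt (pvPow_pos (c+1))))
              (Int.emod_lt_of_pos _ (pvPow_pos (c+1))) hck]
    · rw [PySem.Int.floordiv_eq_ediv_of_pos pvB_pos, ← pv_ediv_pow_pow x c 1, pow_one]

-- B's accumulator after i Montgomery steps, in closed recursive form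
def pvAcc (T0 N0 Np : Int) : Nat → Int
  | 0 => T0
  | i + 1 => pvAcc T0 N0 Np i
      + pvDig (pvAcc T0 N0 Np i) i * Np % pvB * N0 * pvB ^ i

-- A's inner 'for j in range(n)' carry loop, characterized exactly
theorem pvInner_aux (n' i : Nat) (hi : i < n') (Y Nlow m_ : Int) :
    ∀ j, j ≤ n' →
    (PySem.List.pyRange 0 ↑j 1).foldl
      (fun t jj =>
        let temp := PySem.List.pyGetD t.1 (↑i + jj) 0
          + PySem.List.pyGetD (pvLimbs Nlow n') jj 0 * m_ + t.2
        (PySem.List.pySetD t.1 (↑i + jj) (PySem.Int.mod temp pvB),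
          PySem.Int.floordiv temp pvB))
      (pvLimbs Y (2*n'+1), 0)
    = (pvLimbs ((Y + m_ * (Nlow % pvB ^ j) * pvB ^ i) % pvB ^ (i+j)
         + pvB ^ (i+j) * (Y / pvB ^ (i+j))) (2*n'+1),
       (Y + m_ * (Nlow % pvB ^ j) * pvB ^ i) / pvB ^ (i+j) - Y / pvB ^ (i+j)) := by
  intro j
  induction j with
  | zero =>
    intro _
    simp only [Nat.cast_zero, pv_pyRange_zero_nil, List.foldl_nil, pow_zero, Int.emod_one,
      mul_zero, zero_mul, add_zero, Prod.mk.injEq]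
    exact ⟨by rw [Int.emod_add_ediv], by rw [sub_self]⟩
  | succ j ihj =>
    intro hj1
    have hq : i + j < 2*n'+1 := by omega
    have hcast : ((j + 1 : Nat) : Int) = ↑j + 1 := by push_cast; ring
    rw [hcast, pv_foldl_pyRange_succ, ihj (by omega)]
    simp only [show ((i:Int) + ↑j) = ((i + j : Nat) : Int) by push_cast; ring,
      PySem.List.pyGetD_natCast, PySem.List.pySetD_natCast]
    rw [pvLimbs_getD hq, pvLimbs_getD (show j < n' by omega)]
    set q : Nat := i + j with hqdef
    set Z : Int := Y + m_ * (Nlow % pvB ^ j) * pvB ^ i with hZdef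
    set Z1 : Int := Y + m_ * (Nlow % pvB ^ (j+1)) * pvB ^ i with hZ1def
    have hemn : ∀ (x : Int) (p : Nat), 0 ≤ x % pvB ^ p :=
      fun x p => Int.emod_nonneg _ (ne_of_gt (pvPow_pos p))
    have heml : ∀ (x : Int) (p : Nat), x % pvB ^ p < pvB ^ p :=
      fun x p => Int.emod_lt_of_pos _ (pvPow_pos p)
    have hZ : Z1 = Z + m_ * pvDig Nlow j * pvB ^ q := by
      rw [hZ1def, hZdef, pv_emod_succ Nlow j, hqdef, pow_add]; ring
    have hWq : pvDig (Z % pvB ^ q + pvB ^ q * (Y / pvB ^ q)) q = pvDig Y q := by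
      rw [show pvB ^ q * (Y / pvB ^ q) = Y / pvB ^ q * pvB ^ q by ring,
        pvDig_add_mul_high _ _ (hemn Z q) (heml Z q) (le_refl q), Nat.sub_self,
        pvDig_ediv, Nat.add_zero]
    rw [hWq]
    have htemp : pvDig Y q + pvDig Nlow j * m_ + (Z / pvB ^ q - Y / pvB ^ q)
        = Z1 / pvB ^ q + pvB * (-(Y / pvB ^ (q+1))) := by
      have h1 : pvDig Y q = Y / pvB ^ q - pvB * (Y / pvB ^ (q+1)) := by
        rw [pvDig, Int.emod_def, ← pv_ediv_pow_pow Y q 1, pow_one]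
      have h2 : Z1 / pvB ^ q = Z / pvB ^ q + m_ * pvDig Nlow j := by
        rw [hZ, Int.add_mul_ediv_right _ _ (ne_of_gt (pvPow_pos q))]
      rw [h1, h2]; ring
    have h3 : Z1 / pvB ^ (q+1) = Z1 / pvB ^ q / pvB := by
      rw [← pv_ediv_pow_pow Z1 q 1, pow_one]
    simp only [show i + (j+1) = q + 1 by omega]
    rw [PySem.Int.mod_eq_emod_of_pos pvB_pos, PySem.Int.floordiv_eq_ediv_of_pos pvB_pos, htemp]
    simp only [Prod.mk.injEq]
    refine ⟨?_, ?_⟩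
    · rw [Int.add_mul_emod_self_left]
      apply pvLimbs_set (show q < 2*n'+1 by omega)
      · rw [show pvB ^ (q+1) * (Y / pvB ^ (q+1)) = Y / pvB ^ (q+1) * pvB ^ (q+1) by ring,
          pvDig_add_mul_low _ _ (Nat.lt_succ_self q), pvDig_emod _ (Nat.lt_succ_self q)]
        rfl
      · intro k hk hkq
        rw [show pvB ^ q * (Y / pvB ^ q) = Y / pvB ^ q * pvB ^ q by ring,
          show pvB ^ (q+1) * (Y / pvB ^ (q+1)) = Y / pvB ^ (q+1) * pvB ^ (q+1) by ring]
        by_cases hlt : k < q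
        · rw [pvDig_add_mul_low _ _ hlt, pvDig_add_mul_low _ _ (show k < q+1 by omega),
            pvDig_emod _ hlt, pvDig_emod _ (show k < q+1 by omega), hZ,
            pvDig_add_mul_low _ _ hlt]
        · rw [pvDig_add_mul_high _ _ (hemn Z q) (heml Z q) (show q ≤ k by omega),
            pvDig_add_mul_high _ _ (hemn Z1 (q+1)) (heml Z1 (q+1)) (show q+1 ≤ k by omega),
            pvDig_ediv, pvDig_ediv, show q + (k - q) = k by omega,
            show q + 1 + (k - (q+1)) = k by omega]
    · rw [Int.add_mul_ediv_left _ _ (ne_of_gt pvB_pos), h3]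
      ring

theorem pvInner_spec (n' i : Nat) (hi : i < n') (Y Nlow m_ : Int)
    (hNl : 0 ≤ Nlow) (hNlt : Nlow < pvB ^ n') :
    pvInner (pvLimbs Nlow n') m_ ↑n' (pvLimbs Y (2*n'+1)) ↑i
    = (pvLimbs ((Y + m_ * Nlow * pvB ^ i) % pvB ^ (i+n')
         + pvB ^ (i+n') * (Y / pvB ^ (i+n'))) (2*n'+1),
       (Y + m_ * Nlow * pvB ^ i) / pvB ^ (i+n') - Y / pvB ^ (i+n')) := by
  have h := pvInner_aux n' i hi Y Nlow m_ n' (le_refl n')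
  rw [Int.emod_eq_of_lt hNl hNlt] at h
  exact h

-- A's main loop state after i iterations, against B's accumulator
theorem pvOuter_inv (n' : Nat) (hn : 1 ≤ n') (T0 N0 Np : Int)
    (hT : 0 ≤ T0) (hNl : 0 ≤ N0) (hNlt : N0 < pvB ^ n') :
    ∀ i, i ≤ n' →
    (PySem.List.pyRange 0 ↑i 1).foldl (pvOuterStep (pvLimbs N0 n') Np ↑n')
        (pvLimbs T0 (2*n'+1), 0)
      = (pvLimbs (pvAcc T0 N0 Np i % pvB ^ (n'+i)
           + pvB ^ (n'+i) * (T0 / pvB ^ (n'+i))) (2*n'+1),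
         pvAcc T0 N0 Np i / pvB ^ (n'+i) - T0 / pvB ^ (n'+i))
      ∧ 0 ≤ pvAcc T0 N0 Np i
      ∧ pvAcc T0 N0 Np i ≤ T0 + (pvB ^ i - 1) * N0 := by
  have hemn : ∀ (x : Int) (p : Nat), 0 ≤ x % pvB ^ p :=
    fun x p => Int.emod_nonneg _ (ne_of_gt (pvPow_pos p))
  have heml : ∀ (x : Int) (p : Nat), x % pvB ^ p < pvB ^ p :=
    fun x p => Int.emod_lt_of_pos _ (pvPow_pos p)
  intro i
  induction i with
  | zero =>
    intro _
    refine ⟨?_, hT, by simp [pvAcc]⟩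
    simp only [Nat.cast_zero, pv_pyRange_zero_nil, List.foldl_nil, Nat.add_zero, pvAcc,
      Prod.mk.injEq]
    exact ⟨by rw [Int.emod_add_ediv], by rw [sub_self]⟩
  | succ i ih =>
    intro hi1
    have hi : i < n' := by omega
    obtain ⟨hfold, hA0, hAle⟩ := ih (by omega)
    have hcast : ((i + 1 : Nat) : Int) = ↑i + 1 := by push_cast; ring
    rw [hcast, pv_foldl_pyRange_succ, hfold]
    set Ai : Int := pvAcc T0 N0 Np i with hAidef
    set q : Nat := n' + i with hqdef
    have hYi0 : 0 ≤ Ai % pvB ^ q + pvB ^ q * (T0 / pvB ^ q) :=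
      add_nonneg (hemn Ai q)
        (mul_nonneg (le_of_lt (pvPow_pos q)) (Int.ediv_nonneg hT (le_of_lt (pvPow_pos q))))
    set Yi : Int := Ai % pvB ^ q + pvB ^ q * (T0 / pvB ^ q) with hYidef
    unfold pvOuterStep
    simp only [show ((i:Int) + ↑n') = ((i + n' : Nat) : Int) by push_cast; ring,
      PySem.List.pyGetD_natCast, PySem.List.pySetD_natCast]
    rw [pvLimbs_getD (show i < 2*n'+1 by omega)]
    have hdigYi : pvDig Yi i = pvDig Ai i := by
      rw [hYidef, show pvB ^ q * (T0 / pvB ^ q) = T0 / pvB ^ q * pvB ^ q by ring,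
        pvDig_add_mul_low _ _ (show i < q by omega), pvDig_emod _ (show i < q by omega)]
    rw [hdigYi, PySem.Int.mod_eq_emod_of_pos pvB_pos]
    set m : Int := pvDig Ai i * Np % pvB with hmdef
    have hm0 : 0 ≤ m := Int.emod_nonneg _ (ne_of_gt pvB_pos)
    have hmlt : m < pvB := Int.emod_lt_of_pos _ pvB_pos
    rw [pvInner_spec n' i hi Yi N0 m hNl hNlt]
    simp only [show i + n' = q by omega, show n' + (i + 1) = q + 1 by omega]
    set A1 : Int := pvAcc T0 N0 Np (i+1) with hA1def
    have hA1 : A1 = Ai + m * N0 * pvB ^ i := by rw [hA1def, pvAcc]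
    set Zi : Int := Yi + m * N0 * pvB ^ i with hZidef
    have hZA : Zi = A1 + (T0 / pvB ^ q - Ai / pvB ^ q) * pvB ^ q := by
      rw [hZidef, hYidef, hA1, Int.emod_def]; ring
    have hZdivq : Zi / pvB ^ q = A1 / pvB ^ q + (T0 / pvB ^ q - Ai / pvB ^ q) := by
      rw [hZA, Int.add_mul_ediv_right _ _ (ne_of_gt (pvPow_pos q))]
    have hYdivq : Yi / pvB ^ q = T0 / pvB ^ q := by
      rw [hYidef, show Ai % pvB ^ q + pvB ^ q * (T0 / pvB ^ q)
          = Ai % pvB ^ q + T0 / pvB ^ q * pvB ^ q by ring,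
        Int.add_mul_ediv_right _ _ (ne_of_gt (pvPow_pos q)),
        Int.ediv_eq_zero_of_lt (hemn Ai q) (heml Ai q), zero_add]
    have hWq : pvDig (Zi % pvB ^ q + pvB ^ q * (Yi / pvB ^ q)) q = T0 / pvB ^ q % pvB := by
      rw [show pvB ^ q * (Yi / pvB ^ q) = Yi / pvB ^ q * pvB ^ q by ring,
        pvDig_add_mul_high _ _ (hemn Zi q) (heml Zi q) (le_refl q), Nat.sub_self,
        hYdivq]
      simp [pvDig]
    rw [pvLimbs_getD (show q < 2*n'+1 by omega), hWq]
    have hTq1 : T0 / pvB ^ (q+1) = T0 / pvB ^ q / pvB := by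
      rw [← pv_ediv_pow_pow T0 q 1, pow_one]
    have htemp : Ai / pvB ^ q - T0 / pvB ^ q + (Zi / pvB ^ q - Yi / pvB ^ q)
          + T0 / pvB ^ q % pvB
        = A1 / pvB ^ q + pvB * (-(T0 / pvB ^ (q+1))) := by
      rw [hZdivq, hYdivq, Int.emod_def, hTq1]; ring
    rw [PySem.Int.mod_eq_emod_of_pos pvB_pos, PySem.Int.floordiv_eq_ediv_of_pos pvB_pos, htemp]
    have hA1divq1 : A1 / pvB ^ (q+1) = A1 / pvB ^ q / pvB := by
      rw [← pv_ediv_pow_pow A1 q 1, pow_one]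
    refine ⟨?_, ?_, ?_⟩
    · simp only [Prod.mk.injEq]
      refine ⟨?_, ?_⟩
      · rw [Int.add_mul_emod_self_left]
        apply pvLimbs_set (show q < 2*n'+1 by omega)
        · rw [show pvB ^ (q+1) * (T0 / pvB ^ (q+1)) = T0 / pvB ^ (q+1) * pvB ^ (q+1) by ring,
            pvDig_add_mul_low _ _ (Nat.lt_succ_self q), pvDig_emod _ (Nat.lt_succ_self q)]
          rfl
        · intro k hk hkq
          rw [show pvB ^ q * (Yi / pvB ^ q) = Yi / pvB ^ q * pvB ^ q by ring,
            show pvB ^ (q+1) * (T0 / pvB ^ (q+1)) = T0 / pvB ^ (q+1) * pvB ^ (q+1) by ring]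
          by_cases hlt : k < q
          · rw [pvDig_add_mul_low _ _ hlt, pvDig_add_mul_low _ _ (show k < q+1 by omega),
              pvDig_emod _ hlt, pvDig_emod _ (show k < q+1 by omega), hZA,
              pvDig_add_mul_low _ _ hlt]
          · rw [pvDig_add_mul_high _ _ (hemn Zi q) (heml Zi q) (show q ≤ k by omega),
              pvDig_add_mul_high _ _ (hemn A1 (q+1)) (heml A1 (q+1)) (show q+1 ≤ k by omega),
              hYdivq, pvDig_ediv, pvDig_ediv, show q + (k - q) = k by omega,
              show q + 1 + (k - (q+1)) = k by omega]
      · rw [Int.add_mul_ediv_left _ _ (ne_of_gt pvB_pos), hA1divq1]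
        ring
    · rw [hA1]
      exact add_nonneg hA0 (mul_nonneg (mul_nonneg hm0 hNl) (le_of_lt (pvPow_pos i)))
    · rw [hA1]
      have hm1 : m ≤ pvB - 1 := by omega
      have hstep : m * N0 * pvB ^ i ≤ (pvB - 1) * N0 * pvB ^ i :=
        mul_le_mul_of_nonneg_right
          (mul_le_mul_of_nonneg_right hm1 hNl) (le_of_lt (pvPow_pos i))
      have heq : T0 + (pvB ^ i - 1) * N0 + (pvB - 1) * N0 * pvB ^ i
          = T0 + (pvB ^ (i+1) - 1) * N0 := by rw [pow_succ]; ring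
      linarith [hAle]

-- B's fold is pvAcc
theorem pvAccB_fold (T0 N0 Np : Int) :
    ∀ i : Nat,
    (PySem.List.pyRange 0 ↑i 1).foldl
      (fun A ii =>
        let m := PySem.Int.mod (PySem.Int.mod (PySem.Int.floordiv A (pvB ^ ii.toNat)) pvB * Np) pvB
        A + m * N0 * pvB ^ ii.toNat) T0
    = pvAcc T0 N0 Np i := by
  intro i
  induction i with
  | zero => simp [pvAcc]
  | succ i ih =>
    have hcast : ((i + 1 : Nat) : Int) = ↑i + 1 := by push_cast; ring
    rw [hcast, pv_foldl_pyRange_succ, ih]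
    simp only [Int.toNat_natCast]
    rw [PySem.Int.floordiv_eq_ediv_of_pos (pvPow_pos i),
      PySem.Int.mod_eq_emod_of_pos pvB_pos, PySem.Int.mod_eq_emod_of_pos pvB_pos]
    rfl

-- A's final read-out loop sums the limbs above position n'
theorem pvFinal_sum (n' : Nat) (X T1 : Int) :
    ∀ p, p ≤ n'+1 →
    (PySem.List.pyRange 0 ↑p 1).foldl
      (fun acc i => acc + PySem.List.pyGetD (pvLimbs X (2*n'+1)) (↑n' + i) 0 * pvB ^ i.toNat) T1
    = T1 + X / pvB ^ n' % pvB ^ p := by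
  intro p
  induction p with
  | zero => simp
  | succ p ih =>
    intro hp
    have hcast : ((p + 1 : Nat) : Int) = ↑p + 1 := by push_cast; ring
    rw [hcast, pv_foldl_pyRange_succ, ih (by omega)]
    simp only [show ((n':Int) + ↑p) = ((n' + p : Nat) : Int) by push_cast; ring,
      PySem.List.pyGetD_natCast, Int.toNat_natCast]
    rw [pvLimbs_getD (show n' + p < 2*n'+1 by omega),
      show pvDig X (n'+p) = pvDig (X / pvB ^ n') p from (pvDig_ediv X n' p).symm,
      pv_emod_succ]
    ring

theorem pv_main (n' : Nat) (hn : 1 ≤ n') (T N Np : Int)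
    (hT0 : 0 ≤ T) (hTlt : T < pvB ^ (2*n')) (hN0 : 0 ≤ N) (hNlt : N < pvB ^ n') :
    REDC_multiprecision T N Np ↑n' = REDC_multiprecision_alt T N Np ↑n' := by
  have hemn : ∀ (x : Int) (p : Nat), 0 ≤ x % pvB ^ p :=
    fun x p => Int.emod_nonneg _ (ne_of_gt (pvPow_pos p))
  have heml : ∀ (x : Int) (p : Nat), x % pvB ^ p < pvB ^ p :=
    fun x p => Int.emod_lt_of_pos _ (pvPow_pos p)
  have hc1 : ((2 * n' : Nat) : Int) + 1 = ((2 * n' + 1 : Nat) : Int) := by push_cast; ring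
  have hc2 : (2 * (n' : Int)) = ((2 * n' : Nat) : Int) := by push_cast; ring
  have hc3 : ((n' : Int) + 1) = ((n' + 1 : Nat) : Int) := by push_cast; ring
  simp only [REDC_multiprecision, REDC_multiprecision_alt, hc1, hc2, hc3,
    Int.toNat_natCast]
  rw [pvLoad_spec T (2*n'+1) (2*n') (by omega), pvLoad_spec N n' n' (le_refl n')]
  rw [Int.emod_eq_of_lt hT0 hTlt, Int.emod_eq_of_lt hN0 hNlt,
    Int.ediv_eq_zero_of_lt hT0 hTlt, Int.ediv_eq_zero_of_lt hN0 hNlt]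
  obtain ⟨hfold, hA0, hAle⟩ :=
    pvOuter_inv n' hn T N Np hT0 hN0 hNlt n' (le_refl n')
  have hTdiv0 : T / pvB ^ (n'+n') = 0 :=
    Int.ediv_eq_zero_of_lt hT0 (lt_of_lt_of_le hTlt (pvPow_le (by omega)))
  rw [hfold]
  set Af : Int := pvAcc T N Np n' with hAfdef
  dsimp only
  simp only [hTdiv0, mul_zero, add_zero, sub_zero,
    PySem.List.pyGetD_natCast, PySem.List.pySetD_natCast]
  rw [show n' + n' = 2*n' by omega] at *
  rw [pvLimbs_getD (show 2*n' < 2*n'+1 by omega),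
    pvDig_zero_of_lt (hemn Af (2*n')) (heml Af (2*n')) (le_refl (2*n')), zero_add]
  have hNub : N ≤ pvB ^ n' - 1 := by omega
  have hAf2 : Af < 2 * pvB ^ (2*n') := by
    have h1 : (pvB ^ n' - 1) * N ≤ (pvB ^ n' - 1) * (pvB ^ n' - 1) :=
      mul_le_mul_of_nonneg_left hNub (by have := pvPow_pos n'; omega)
    have hpd : pvB ^ (2*n') = pvB ^ n' * pvB ^ n' := by rw [← pow_add]; congr 1; omega
    nlinarith [pvPow_pos n', hAle]
  have hAfub : Af < pvB ^ (2*n'+1) := by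
    have h2 : (2:Int) ≤ pvB := by norm_num [pvB]
    have h3 := pvPow_pos (2*n')
    calc Af < 2 * pvB ^ (2*n') := hAf2
    _ ≤ pvB * pvB ^ (2*n') := by nlinarith
    _ = pvB ^ (2*n'+1) := by rw [pow_succ]; ring
  have hdq0 : 0 ≤ Af / pvB ^ (2*n') := Int.ediv_nonneg hA0 (le_of_lt (pvPow_pos (2*n')))
  have hdqlt : Af / pvB ^ (2*n') < pvB := by
    rw [Int.ediv_lt_iff_lt_mul (pvPow_pos (2*n'))]
    calc Af < pvB ^ (2*n'+1) := hAfub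
    _ = pvB * pvB ^ (2*n') := by rw [pow_succ]; ring
  have hset : (pvLimbs (Af % pvB ^ (2*n')) (2*n'+1)).set (2*n') (Af / pvB ^ (2*n'))
      = pvLimbs Af (2*n'+1) := by
    apply pvLimbs_set (show 2*n' < 2*n'+1 by omega)
    · rw [pvDig, Int.emod_eq_of_lt hdq0 hdqlt]
    · intro k hk hkq
      exact pvDig_emod Af (show k < 2*n' by omega)
  rw [hset, pvFinal_sum n' Af 0 (n'+1) (le_refl _)]
  have hfd0 : 0 ≤ Af / pvB ^ n' := Int.ediv_nonneg hA0 (le_of_lt (pvPow_pos n'))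
  have hfdlt : Af / pvB ^ n' < pvB ^ (n'+1) := by
    rw [Int.ediv_lt_iff_lt_mul (pvPow_pos n')]
    calc Af < pvB ^ (2*n'+1) := hAfub
    _ = pvB ^ (n'+1) * pvB ^ n' := by rw [← pow_add]; congr 1; omega
  rw [Int.emod_eq_of_lt hfd0 hfdlt, zero_add]
  rw [pvAccB_fold T N Np n',
    PySem.Int.floordiv_eq_ediv_of_pos (pvPow_pos n'), ← hAfdef]
  split_ifs <;> rfl

-- ===== VERDICT (by name: the statement is the Claim_ definition above) =====
theorem REDC_multiprecision_spec : Claim_equal_REDC_multiprecision := by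
  intro T N Np n hdom hpre
  obtain ⟨hT, hN, hn⟩ := hpre
  unfold Spec_REDC_multiprecision
  have hnn : n = ↑n.toNat := by omega
  have hn1 : 1 ≤ n.toNat := by omega
  have hdomN : N ≤ 2147483648 := by
    simp only [Dom_REDC_multiprecision, pvDomInt, Bool.and_eq_true, decide_eq_true_eq] at hdom
    exact hdom.1.1.2.2
  have hdomT : T ≤ 2147483648 := by
    simp only [Dom_REDC_multiprecision, pvDomInt, Bool.and_eq_true, decide_eq_true_eq] at hdom
    exact hdom.1.1.1.2
  have hNlt : N < pvB ^ n.toNat := by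
    calc N ≤ 2147483648 := hdomN
    _ < pvB ^ 1 := by norm_num [pvB]
    _ ≤ pvB ^ n.toNat := pvPow_le hn1
  have hTlt : T < pvB ^ (2 * n.toNat) := by
    calc T ≤ 2147483648 := hdomT
    _ < pvB ^ 1 := by norm_num [pvB]
    _ ≤ pvB ^ (2 * n.toNat) := pvPow_le (by omega)
  rw [hnn]
  exact pv_main n.toNat hn1 T N Np hT hTlt hN hNlt
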